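-- pv_equiv track=rewrite | github.com/digitalgoldfisj79/Voynich | scripts/p81_anchor_token_map_v2.py | find_pattern_hits
-- ===== SOURCE A (Python) =====
-- def find_pattern_hits(tokens, patterns):
--     """
--     For each token, record which chargram rules hit.
--     Returns dict: idx -> set(rule_id)
--     """
--     hits = {}
--     for idx, tok in enumerate(tokens):
--         tok_hits = []
--         for rule_id, pat, side in patterns:
--             if side == "left":
--                 if tok.startswith(pat):
--                     tok_hits.append(rule_id)
--             elif side == "right":
--                 if tok.endswith(pat):
--                     tok_hits.append(rule_id)
--             else:  # any
--                 if pat in tok: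
--                     tok_hits.append(rule_id)
--         if tok_hits:
--             hits[idx] = set(tok_hits)
--     return hits
-- ===== SOURCE B (Python) =====
-- def find_pattern_hits(tokens, patterns):
--     """
--     For each token, record which chargram rules hit.
--     Returns dict: idx -> set(rule_id)
--     Inverted strategy: the patterns are indexed once into three hash maps
--     (prefix / suffix / substring patterns -> their positions); each token is
--     then matched by looking up its own prefixes, suffixes and substrings in
--     those maps, so no per-token scan over the pattern list remains.
--     """
--     left_ix, right_ix, any_ix = {}, {}, {}
--     for j, (rule_id, pat, side) in enumerate(patterns):
--         ix = left_ix if side == "left" else right_ix if side == "right" else any_ix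
--         ix.setdefault(pat, []).append((j, rule_id))
--     hits = {}
--     for idx, tok in enumerate(tokens):
--         n = len(tok)
--         matched = set()
--         for k in range(n + 1):
--             matched.update(left_ix.get(tok[:k], ()))
--             matched.update(right_ix.get(tok[k:], ()))
--             for j2 in range(k, n + 1):
--                 matched.update(any_ix.get(tok[k:j2], ()))
--         tok_hits = [rid for _, rid in sorted(matched, key=lambda p: p[0])]
--         if tok_hits:
--             hits[idx] = set(tok_hits)
--     return hits
-- ===== Notes on version B (the rewrite author's own statement) =====
-- stated objective: alternative
-- what changed: B builds three hash indexes over the patterns once (prefix/suffix/substring pattern -> positions) and matches each token by looking up the token's own prefixes, suffixes and substrings in them, so the per-token scan over the pattern list disappears; matched positions are collected in a set and emitted in pattern order.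
import Mathlib
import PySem

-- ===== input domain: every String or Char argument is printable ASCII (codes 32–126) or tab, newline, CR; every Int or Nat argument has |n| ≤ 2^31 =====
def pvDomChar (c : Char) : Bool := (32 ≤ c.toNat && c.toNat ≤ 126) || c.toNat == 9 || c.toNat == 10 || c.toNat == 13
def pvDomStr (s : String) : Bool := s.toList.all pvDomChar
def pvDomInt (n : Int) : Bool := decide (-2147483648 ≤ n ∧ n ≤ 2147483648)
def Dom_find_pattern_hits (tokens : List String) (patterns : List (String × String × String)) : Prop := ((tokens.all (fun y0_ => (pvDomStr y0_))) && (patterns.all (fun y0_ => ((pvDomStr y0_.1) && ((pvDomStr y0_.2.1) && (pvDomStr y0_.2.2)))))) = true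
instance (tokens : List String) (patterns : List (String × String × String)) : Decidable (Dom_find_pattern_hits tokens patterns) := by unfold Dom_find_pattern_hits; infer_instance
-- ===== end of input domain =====

-- B replaces A's per-token scan over the pattern list by three hash indexes built once over
-- the patterns, queried with each token's own prefixes/suffixes/substrings; equal return values.

-- ===== PORT A =====
-- A's inner-loop body: one pattern checked against one token, appending its rule_id on a hit.
def pvMatchStep (tok : String) (acc : List String) (q : String × String × String) : List String :=
  if q.2.2 == "left" then
    (if PySem.Str.startswith tok q.2.1 then acc ++ [q.1] else acc)
  else if q.2.2 == "right" then
    (if PySem.Str.endswith tok q.2.1 then acc ++ [q.1] else acc)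
  else
    (if PySem.Str.isIn q.2.1 tok then acc ++ [q.1] else acc)

def find_pattern_hits (tokens : List String) (patterns : List (String × String × String)) : List (Int × List String) :=
  (PySem.List.enumerate tokens).foldl (fun hits p =>
    let tok_hits := patterns.foldl (pvMatchStep p.2) []
    if tok_hits ≠ [] then PySem.Dict.insert hits p.1 (PySem.Set.ofList tok_hits) else hits)
    PySem.Dict.empty |>.items

-- ===== PORT B =====
-- the index-building step: pattern entry p goes into the left/right/any map under its pattern string
def pvIxStep
    (st : PySem.Dict String (List (Int × String)) × PySem.Dict String (List (Int × String)) × PySem.Dict String (List (Int × String)))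
    (p : Int × (String × String × String)) :
    PySem.Dict String (List (Int × String)) × PySem.Dict String (List (Int × String)) × PySem.Dict String (List (Int × String)) :=
  if p.2.2.2 == "left" then
    (st.1.modify p.2.2.1 [] (· ++ [(p.1, p.2.1)]), st.2.1, st.2.2)
  else if p.2.2.2 == "right" then
    (st.1, st.2.1.modify p.2.2.1 [] (· ++ [(p.1, p.2.1)]), st.2.2)
  else
    (st.1, st.2.1, st.2.2.modify p.2.2.1 [] (· ++ [(p.1, p.2.1)]))

-- B's per-token matched set: look the token's prefixes/suffixes/substrings up in the three indexes
def pvMatched (dl dr da : PySem.Dict String (List (Int × String))) (tok : String) : PySem.Set (Int × String) :=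
  (PySem.List.pyRange 0 ((PySem.Str.len tok : Int) + 1) 1).foldl (fun m k =>
    let m1 := PySem.Set.update m (dl.getD (PySem.Str.slice tok none (some k)) [])
    let m2 := PySem.Set.update m1 (dr.getD (PySem.Str.slice tok (some k) none) [])
    (PySem.List.pyRange k ((PySem.Str.len tok : Int) + 1) 1).foldl (fun m' j2 =>
      PySem.Set.update m' (da.getD (PySem.Str.slice tok (some k) (some j2)) [])) m2)
    PySem.Set.empty

-- B's per-token hit list: matched pattern positions emitted in pattern order
def pvTokHits (dl dr da : PySem.Dict String (List (Int × String))) (tok : String) : List String :=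
  (PySem.List.sorted (pvMatched dl dr da tok) (fun p => p.1) false).map (fun p => p.2)

def find_pattern_hits_alt (tokens : List String) (patterns : List (String × String × String)) : List (Int × List String) :=
  let st := (PySem.List.enumerate patterns).foldl pvIxStep (PySem.Dict.empty, PySem.Dict.empty, PySem.Dict.empty)
  (PySem.List.enumerate tokens).foldl (fun hits p =>
    let tok_hits := pvTokHits st.1 st.2.1 st.2.2 p.2
    if tok_hits ≠ [] then PySem.Dict.insert hits p.1 (PySem.Set.ofList tok_hits) else hits)
    PySem.Dict.empty |>.items

-- ===== PRECONDITION & SPEC =====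
def Spec_find_pattern_hits (tokens : List String) (patterns : List (String × String × String)) (out : List (Int × List String)) : Prop := out = find_pattern_hits_alt tokens patterns
instance (tokens : List String) (patterns : List (String × String × String)) (out : List (Int × List String)) : Decidable (Spec_find_pattern_hits tokens patterns out) := by unfold Spec_find_pattern_hits; infer_instance

-- ===== CLAIM (what is proved, stated in full; the proofs are below) =====
def Claim_equal_find_pattern_hits : Prop := ∀ (tokens : List String) (patterns : List (String × String × String)), Dom_find_pattern_hits tokens patterns → Spec_find_pattern_hits tokens patterns (find_pattern_hits tokens patterns)

-- ===== LEMMAS AND PROOFS =====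

-- whether one pattern entry hits one token (the Boolean A's branch structure computes)
def pvHit (tok : String) (q : String × String × String) : Bool :=
  if q.2.2 == "left" then PySem.Str.startswith tok q.2.1
  else if q.2.2 == "right" then PySem.Str.endswith tok q.2.1
  else PySem.Str.isIn q.2.1 tok

theorem pvMatchStep_eq (tok : String) (acc : List String) (q : String × String × String) :
    pvMatchStep tok acc q = if pvHit tok q then acc ++ [q.1] else acc := by
  unfold pvMatchStep pvHit; split_ifs <;> rfl

theorem pvA_tok (tok : String) (patterns : List (String × String × String)) :
    patterns.foldl (pvMatchStep tok) [] = (patterns.filter (pvHit tok)).map (fun q => q.1) := by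
  rw [PySem.List.foldl_congr_mem patterns (pvMatchStep tok)
    (fun acc q => if pvHit tok q then acc ++ [q.1] else acc) []
    (fun acc q _ => pvMatchStep_eq tok acc q)]
  simpa using PySem.List.foldl_append_if (pvHit tok) (fun q => q.1) patterns []

-- bucket characterisation of the three indexes built by pvIxStep
theorem pv_buckets (key : String) :
    ∀ (l : List (Int × (String × String × String))) (dl dr da : PySem.Dict String (List (Int × String))),
      (l.foldl pvIxStep (dl, dr, da)).1.getD key []
        = dl.getD key [] ++ (l.filter (fun p => p.2.2.2 == "left" && p.2.2.1 == key)).map (fun p => (p.1, p.2.1)) ∧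
      (l.foldl pvIxStep (dl, dr, da)).2.1.getD key []
        = dr.getD key [] ++ (l.filter (fun p => p.2.2.2 == "right" && p.2.2.1 == key)).map (fun p => (p.1, p.2.1)) ∧
      (l.foldl pvIxStep (dl, dr, da)).2.2.getD key []
        = da.getD key [] ++ (l.filter (fun p => !(p.2.2.2 == "left") && !(p.2.2.2 == "right") && p.2.2.1 == key)).map (fun p => (p.1, p.2.1)) := by
  intro l; induction l with
  | nil => intro dl dr da; simp
  | cons p l ih =>
      intro dl dr da
      rw [List.foldl_cons]
      by_cases hk : p.2.2.1 = key
      · subst hk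
        by_cases h1 : p.2.2.2 == "left"
        · have h1' : p.2.2.2 = "left" := by simpa using h1
          simp only [pvIxStep, h1, if_true]
          rcases ih (dl.modify p.2.2.1 [] (· ++ [(p.1, p.2.1)])) dr da with ⟨e1, e2, e3⟩
          refine ⟨?_, ?_, ?_⟩ <;>
            simp [e1, e2, e3, h1', PySem.Dict.getD_modify_self]
        · by_cases h2 : p.2.2.2 == "right"
          · have h1' : p.2.2.2 ≠ "left" := by simpa using h1
            have h2' : p.2.2.2 = "right" := by simpa using h2
            simp only [pvIxStep, h1, h2, if_true, if_false, Bool.false_eq_true]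
            rcases ih dl (dr.modify p.2.2.1 [] (· ++ [(p.1, p.2.1)])) da with ⟨e1, e2, e3⟩
            refine ⟨?_, ?_, ?_⟩ <;>
              simp [e1, e2, e3, h2', PySem.Dict.getD_modify_self]
          · have h1' : p.2.2.2 ≠ "left" := by simpa using h1
            have h2' : p.2.2.2 ≠ "right" := by simpa using h2
            simp only [pvIxStep, h1, h2, if_false, Bool.false_eq_true]
            rcases ih dl dr (da.modify p.2.2.1 [] (· ++ [(p.1, p.2.1)])) with ⟨e1, e2, e3⟩
            refine ⟨?_, ?_, ?_⟩ <;>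
              simp [e1, e2, e3, h1', h2', PySem.Dict.getD_modify_self]
      · have hne : key ≠ p.2.2.1 := fun h => hk h.symm
        by_cases h1 : p.2.2.2 == "left"
        · have h1' : p.2.2.2 = "left" := by simpa using h1
          simp only [pvIxStep, h1, if_true]
          rcases ih (dl.modify p.2.2.1 [] (· ++ [(p.1, p.2.1)])) dr da with ⟨e1, e2, e3⟩
          refine ⟨?_, ?_, ?_⟩ <;>
            simp [e1, e2, e3, h1', hk,
              PySem.Dict.getD_modify_of_ne _ _ _ hne]
        · by_cases h2 : p.2.2.2 == "right"
          · have h1' : p.2.2.2 ≠ "left" := by simpa using h1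
            have h2' : p.2.2.2 = "right" := by simpa using h2
            simp only [pvIxStep, h1, h2, if_true, if_false, Bool.false_eq_true]
            rcases ih dl (dr.modify p.2.2.1 [] (· ++ [(p.1, p.2.1)])) da with ⟨e1, e2, e3⟩
            refine ⟨?_, ?_, ?_⟩ <;>
              simp [e1, e2, e3, h2', hk,
                PySem.Dict.getD_modify_of_ne _ _ _ hne]
          · have h1' : p.2.2.2 ≠ "left" := by simpa using h1
            have h2' : p.2.2.2 ≠ "right" := by simpa using h2
            simp only [pvIxStep, h1, h2, if_false, Bool.false_eq_true]
            rcases ih dl dr (da.modify p.2.2.1 [] (· ++ [(p.1, p.2.1)])) with ⟨e1, e2, e3⟩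
            refine ⟨?_, ?_, ?_⟩ <;>
              simp [e1, e2, e3, h1', h2', hk,
                PySem.Dict.getD_modify_of_ne _ _ _ hne]

theorem pv_mem_foldl {α β : Type} (step : List α → β → List α) (P : β → Prop) (x : α)
    (h : ∀ m k, (x ∈ step m k ↔ x ∈ m ∨ P k)) :
    ∀ (l : List β) (m0 : List α), x ∈ l.foldl step m0 ↔ x ∈ m0 ∨ ∃ k ∈ l, P k := by
  intro l; induction l with
  | nil => simp
  | cons k l ih => intro m0; rw [List.foldl_cons, ih, h]; simp; tauto

theorem pv_nodup_foldl {α β : Type} (step : List α → β → List α)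
    (h : ∀ m k, m.Nodup → (step m k).Nodup) :
    ∀ (l : List β) (m0 : List α), m0.Nodup → (l.foldl step m0).Nodup := by
  intro l; induction l with
  | nil => intro _ h0; exact h0
  | cons k l ih => intro m0 h0; exact ih _ (h _ _ h0)

-- prefix lookup characterisation: some tok[:k] equals pat  ↔  tok.startswith(pat)
theorem pv_prefix_iff (tok pat : String) :
    (∃ k ∈ PySem.List.pyRange 0 ((PySem.Str.len tok : Int) + 1) 1,
        PySem.Str.slice tok none (some k) = pat) ↔ PySem.Str.startswith tok pat = true := by
  rw [PySem.Str.startswith_eq, PySem.Chars.startswith_iff]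
  constructor
  · rintro ⟨k, hk, hs⟩
    rw [PySem.List.mem_pyRange_one] at hk
    have hlist : pat.toList = (PySem.Str.slice tok none (some k)).toList := by rw [hs]
    rw [PySem.Str.toList_slice, PySem.Chars.slice_eq_listSlice,
      PySem.List.slice_to _ hk.1] at hlist
    rw [hlist]; exact List.take_prefix _ _
  · intro h
    refine ⟨(pat.toList.length : Int), ?_, ?_⟩
    · rw [PySem.List.mem_pyRange_one]
      have hle := h.length_le
      simp only [PySem.Str.len_eq]
      omega
    · apply String.toList_inj.mp
      rw [PySem.Str.toList_slice, PySem.Chars.slice_eq_listSlice,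
        PySem.List.slice_to _ (by positivity)]
      simpa using (List.prefix_iff_eq_take.mp h).symm

theorem pv_suffix_iff (tok pat : String) :
    (∃ k ∈ PySem.List.pyRange 0 ((PySem.Str.len tok : Int) + 1) 1,
        PySem.Str.slice tok (some k) none = pat) ↔ PySem.Str.endswith tok pat = true := by
  rw [PySem.Str.endswith_eq, PySem.Chars.endswith_iff]
  constructor
  · rintro ⟨k, hk, hs⟩
    rw [PySem.List.mem_pyRange_one] at hk
    have hlist : pat.toList = (PySem.Str.slice tok (some k) none).toList := by rw [hs]
    rw [PySem.Str.toList_slice, PySem.Chars.slice_eq_listSlice,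
      PySem.List.slice_from _ hk.1] at hlist
    rw [hlist]; exact List.drop_suffix _ _
  · intro h
    have hle := h.length_le
    refine ⟨((tok.toList.length - pat.toList.length : Nat) : Int), ?_, ?_⟩
    · rw [PySem.List.mem_pyRange_one]
      simp only [PySem.Str.len_eq]
      omega
    · apply String.toList_inj.mp
      rw [PySem.Str.toList_slice, PySem.Chars.slice_eq_listSlice,
        PySem.List.slice_from _ (by positivity)]
      simpa using (List.suffix_iff_eq_drop.mp h).symm

theorem pv_infix_iff (tok pat : String) :
    (∃ k ∈ PySem.List.pyRange 0 ((PySem.Str.len tok : Int) + 1) 1,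
        ∃ j2 ∈ PySem.List.pyRange k ((PySem.Str.len tok : Int) + 1) 1,
          PySem.Str.slice tok (some k) (some j2) = pat) ↔ PySem.Str.isIn pat tok = true := by
  rw [PySem.Str.isIn_eq]
  constructor
  · rintro ⟨k, hk, j2, hj2, hs⟩
    rw [PySem.List.mem_pyRange_one] at hk hj2
    have hlist : pat.toList = (PySem.Str.slice tok (some k) (some j2)).toList := by rw [hs]
    rw [PySem.Str.toList_slice, PySem.Chars.slice_eq_listSlice,
      PySem.List.slice_toNat _ hk.1 (le_trans hk.1 hj2.1)] at hlist
    rw [← PySem.Chars.exists_prefix_drop_iff_isIn]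
    exact ⟨k.toNat, hlist ▸ List.take_prefix _ _⟩
  · intro h
    obtain ⟨j, hpre⟩ := (PySem.Chars.exists_prefix_drop_iff_isIn pat.toList tok.toList).mpr h
    -- normalise j to at most the length of the token
    have hpre' : pat.toList <+: tok.toList.drop (min j tok.toList.length) := by
      rcases Nat.le_total j tok.toList.length with hj | hj
      · rwa [min_eq_left hj]
      · have : tok.toList.drop j = [] := List.drop_eq_nil_of_le hj
        have hnil : pat.toList = [] := List.prefix_nil.mp (this ▸ hpre)
        simp [hnil]
    set i := min j tok.toList.length with hi
    have hilen : i ≤ tok.toList.length := min_le_right _ _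
    have hplen : pat.toList.length ≤ tok.toList.length - i := by
      have := hpre'.length_le
      simpa [List.length_drop] using this
    refine ⟨(i : Int), ?_, ((i + pat.toList.length : Nat) : Int), ?_, ?_⟩
    · rw [PySem.List.mem_pyRange_one]
      simp only [PySem.Str.len_eq]
      omega
    · rw [PySem.List.mem_pyRange_one]
      simp only [PySem.Str.len_eq]
      omega
    · apply String.toList_inj.mp
      rw [PySem.Str.toList_slice, PySem.Chars.slice_eq_listSlice,
        PySem.List.slice_toNat _ (by positivity) (by positivity)]
      have : ((i + pat.toList.length : Nat) : Int).toNat - ((i : Nat) : Int).toNat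
          = pat.toList.length := by omega
      rw [this]
      simpa using (List.prefix_iff_eq_take.mp hpre').symm

theorem pv_mem_matched (dl dr da : PySem.Dict String (List (Int × String))) (tok : String)
    (x : Int × String) :
    x ∈ pvMatched dl dr da tok ↔
      ∃ k ∈ PySem.List.pyRange 0 ((PySem.Str.len tok : Int) + 1) 1,
        (x ∈ dl.getD (PySem.Str.slice tok none (some k)) [] ∨
         x ∈ dr.getD (PySem.Str.slice tok (some k) none) [] ∨
         ∃ j2 ∈ PySem.List.pyRange k ((PySem.Str.len tok : Int) + 1) 1,
           x ∈ da.getD (PySem.Str.slice tok (some k) (some j2)) []) := by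
  unfold pvMatched
  rw [pv_mem_foldl _
    (fun k =>
      x ∈ dl.getD (PySem.Str.slice tok none (some k)) [] ∨
      x ∈ dr.getD (PySem.Str.slice tok (some k) none) [] ∨
      ∃ j2 ∈ PySem.List.pyRange k ((PySem.Str.len tok : Int) + 1) 1,
        x ∈ da.getD (PySem.Str.slice tok (some k) (some j2)) []) x ?_]
  · simp
  · intro m k
    simp only []
    rw [pv_mem_foldl _
      (fun j2 => x ∈ da.getD (PySem.Str.slice tok (some k) (some j2)) []) x
      (fun m' j2 => PySem.Set.mem_update _ _ _)]
    simp [PySem.Set.mem_update]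
    tauto

theorem pv_nodup_matched (dl dr da : PySem.Dict String (List (Int × String))) (tok : String) :
    (pvMatched dl dr da tok).Nodup := by
  unfold pvMatched
  exact pv_nodup_foldl _
    (fun m k hm => pv_nodup_foldl _
      (fun m' j2 hm' => PySem.Set.nodup_update _ _ hm') _ _
      (PySem.Set.nodup_update _ _ (PySem.Set.nodup_update _ _ hm))) _ _ List.nodup_nil

theorem pv_enum_proj (q : (String × String × String) → Bool) :
    ∀ (ps : List (String × String × String)) (s : Int),
      ((PySem.List.enumerate ps s).filter (fun p => q p.2)).map (fun p => p.2.1)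
        = (ps.filter q).map (fun r => r.1) := by
  intro ps; induction ps with
  | nil => intro s; rfl
  | cons r ps ih =>
      intro s
      simp only [PySem.List.enumerate_cons, List.filter_cons]
      by_cases hq : q r <;> simp [hq, ih (s + 1)]

-- B's per-token result equals A's per-token loop
theorem pv_tok_eq (patterns : List (String × String × String)) (tok : String) :
    pvTokHits
      ((PySem.List.enumerate patterns).foldl pvIxStep (PySem.Dict.empty, PySem.Dict.empty, PySem.Dict.empty)).1
      ((PySem.List.enumerate patterns).foldl pvIxStep (PySem.Dict.empty, PySem.Dict.empty, PySem.Dict.empty)).2.1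
      ((PySem.List.enumerate patterns).foldl pvIxStep (PySem.Dict.empty, PySem.Dict.empty, PySem.Dict.empty)).2.2
      tok
    = patterns.foldl (pvMatchStep tok) [] := by
  set st := (PySem.List.enumerate patterns).foldl pvIxStep
    (PySem.Dict.empty, PySem.Dict.empty, PySem.Dict.empty) with hst
  have hb := fun key => pv_buckets key (PySem.List.enumerate patterns)
    PySem.Dict.empty PySem.Dict.empty PySem.Dict.empty
  have hdl : ∀ key, st.1.getD key []
      = ((PySem.List.enumerate patterns).filter
          (fun p => p.2.2.2 == "left" && p.2.2.1 == key)).map (fun p => (p.1, p.2.1)) :=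
    fun key => by simpa using (hb key).1
  have hdr : ∀ key, st.2.1.getD key []
      = ((PySem.List.enumerate patterns).filter
          (fun p => p.2.2.2 == "right" && p.2.2.1 == key)).map (fun p => (p.1, p.2.1)) :=
    fun key => by simpa using (hb key).2.1
  have hda : ∀ key, st.2.2.getD key []
      = ((PySem.List.enumerate patterns).filter
          (fun p => !(p.2.2.2 == "left") && !(p.2.2.2 == "right") && p.2.2.1 == key)).map
          (fun p => (p.1, p.2.1)) :=
    fun key => by simpa using (hb key).2.2
  rw [pvA_tok]
  unfold pvTokHits
  -- the list of hitting pattern entries, in pattern order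
  have hmem : ∀ x, x ∈ pvMatched st.1 st.2.1 st.2.2 tok ↔
      x ∈ ((PySem.List.enumerate patterns).filter (fun p => pvHit tok p.2)).map
        (fun p => (p.1, p.2.1)) := by
    intro x
    rw [pv_mem_matched]
    simp only [hdl, hdr, hda, List.mem_map, List.mem_filter, Bool.and_eq_true, beq_iff_eq,
      Bool.not_eq_eq_eq_not, Bool.not_true, beq_eq_false_iff_ne, ne_eq]
    constructor
    · rintro ⟨k, hk, ⟨p, ⟨hpE, hside, hpat⟩, hx⟩ | ⟨p, ⟨hpE, hside, hpat⟩, hx⟩ |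
        ⟨j2, hj2, p, ⟨hpE, ⟨hs1, hs2⟩, hpat⟩, hx⟩⟩
      · exact ⟨p, ⟨hpE, by
          unfold pvHit
          simp only [hside, beq_self_eq_true, if_true]
          exact (pv_prefix_iff tok p.2.2.1).mp ⟨k, hk, hpat ▸ rfl⟩⟩, hx⟩
      · exact ⟨p, ⟨hpE, by
          unfold pvHit
          by_cases hL : p.2.2.2 == "left"
          · exact absurd (by simpa using hL) (by simp [hside])
          · simp only [hside, beq_self_eq_true, if_true]
            exact (pv_suffix_iff tok p.2.2.1).mp ⟨k, hk, hpat ▸ rfl⟩⟩, hx⟩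
      · exact ⟨p, ⟨hpE, by
          unfold pvHit
          simp only [beq_eq_false_iff_ne.mpr hs1, beq_eq_false_iff_ne.mpr hs2, if_false,
            Bool.false_eq_true]
          exact (pv_infix_iff tok p.2.2.1).mp ⟨k, hk, j2, hj2, hpat ▸ rfl⟩⟩, hx⟩
    · rintro ⟨p, ⟨hpE, hhit⟩, hx⟩
      unfold pvHit at hhit
      by_cases hL : p.2.2.2 == "left"
      · simp only [hL, if_true] at hhit
        obtain ⟨k, hk, hs⟩ := (pv_prefix_iff tok p.2.2.1).mpr hhit
        exact ⟨k, hk, Or.inl ⟨p, ⟨hpE, by simpa using hL, hs.symm⟩, hx⟩⟩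
      · by_cases hR : p.2.2.2 == "right"
        · simp only [hL, hR, if_true, if_false, Bool.false_eq_true] at hhit
          obtain ⟨k, hk, hs⟩ := (pv_suffix_iff tok p.2.2.1).mpr hhit
          exact ⟨k, hk, Or.inr (Or.inl ⟨p, ⟨hpE, by simpa using hR, hs.symm⟩, hx⟩)⟩
        · simp only [hL, hR, if_false, Bool.false_eq_true] at hhit
          obtain ⟨k, hk, j2, hj2, hs⟩ := (pv_infix_iff tok p.2.2.1).mpr hhit
          exact ⟨k, hk, Or.inr (Or.inr ⟨j2, hj2,
            ⟨p, ⟨hpE, ⟨by simpa using hL, by simpa using hR⟩, hs.symm⟩, hx⟩⟩)⟩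
  have hpair : (((PySem.List.enumerate patterns).filter (fun p => pvHit tok p.2)).map
      (fun p => (p.1, p.2.1))).Pairwise (fun a b => a.1 < b.1) :=
    List.Pairwise.map _ (fun a b h => h)
      ((PySem.List.pairwise_lt_enumerate patterns 0).filter _)
  have hndys : (((PySem.List.enumerate patterns).filter (fun p => pvHit tok p.2)).map
      (fun p => (p.1, p.2.1))).Nodup :=
    hpair.imp (fun {a b} h heq => absurd (heq ▸ h) (lt_irrefl _))
  have hperm := (List.perm_ext_iff_of_nodup hndys (pv_nodup_matched st.1 st.2.1 st.2.2 tok)).mpr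
    (fun a => ((hmem a).symm))
  rw [PySem.List.sorted_eq_of_perm_of_pairwise_lt _ _ _ hperm hpair]
  rw [List.map_map]
  exact pv_enum_proj (pvHit tok) patterns 0

-- ===== VERDICT (by name: the statement is the Claim_ definition above) =====
theorem find_pattern_hits_spec : Claim_equal_find_pattern_hits := by
  intro tokens patterns _
  show find_pattern_hits tokens patterns = find_pattern_hits_alt tokens patterns
  unfold find_pattern_hits find_pattern_hits_alt
  exact congrArg PySem.Dict.items
    (PySem.List.foldl_congr_mem _ _ _ _ (fun acc p _ => by rw [pv_tok_eq]))
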